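-- pv_equiv track=rewrite | github.com/duaraghav8/Random-Programs | numberToDigital/digital.py | digital
-- ===== SOURCE A (Python) =====
-- digits = {
-- 	'0' : '\n --\n|  |\n|  |\n --',
-- 	'1' : '\n\n\n|\n|',
-- 	'2' : '--\n  |\n--\n|\n --',
-- 	'3' : '--\n  |\n--\n  |\n--',
-- 	'4' : '\n\n|  |\n --\n   |',
-- 	'5' : ' --\n|\n --\n   |\n --',
-- 	'6' : '\n\n|\n|__\n|__|',
-- 	'7' : '\n\n--\n  |\n  |',
-- 	'8' : ' --\n|  |\n --\n|  |\n --',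
-- 	'9' : ' --\n|  |\n --\n   |\n --'
-- };
--
-- def digital (number):
-- 	space = [ '' for i in range (5) ];
-- 	for count in range (5):
-- 		for digit in number:
-- 			adder = digits [digit].split ('\n') [count];
-- 			if (len (adder) < 5): adder += ' ' * (5 - len (adder));
-- 			space [count] += adder;
-- 	return (space);
-- ===== SOURCE B (Python) =====
-- # Each digit's 5x5 art block precomputed as one flat 25-char string; rows are slices.
-- FLAT = {
-- 	'0': '      --  |  | |  |  --  ',
-- 	'1': '               |    |    ',
-- 	'2': '--     |  --   |     --  ',
-- 	'3': '--     |  --     |  --   ',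
-- 	'4': '          |  |  --     | ',
-- 	'5': ' --  |     --     |  --  ',
-- 	'6': '          |    |__  |__| ',
-- 	'7': '          --     |    |  ',
-- 	'8': ' --  |  |  --  |  |  --  ',
-- 	'9': ' --  |  |  --     |  --  ',
-- }
--
-- def digital(number):
-- 	flats = [FLAT[d] for d in number]
-- 	return [''.join(f[5*r:5*r+5] for f in flats) for r in range(5)]
-- ===== Notes on version B (the rewrite author's own statement) =====
-- stated objective: alternative
-- what changed: A splits and pads each digit's art template inside a count-major double loop mutating a 5-slot row list; B replaces the template processing entirely with a precomputed table of flat 25-char strings per digit (every art line is at most 4 chars, so padding yields exactly 5x5 blocks) and builds each output row by slicing f[5r:5r+5] out of each flat string and joining.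
import Mathlib
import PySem

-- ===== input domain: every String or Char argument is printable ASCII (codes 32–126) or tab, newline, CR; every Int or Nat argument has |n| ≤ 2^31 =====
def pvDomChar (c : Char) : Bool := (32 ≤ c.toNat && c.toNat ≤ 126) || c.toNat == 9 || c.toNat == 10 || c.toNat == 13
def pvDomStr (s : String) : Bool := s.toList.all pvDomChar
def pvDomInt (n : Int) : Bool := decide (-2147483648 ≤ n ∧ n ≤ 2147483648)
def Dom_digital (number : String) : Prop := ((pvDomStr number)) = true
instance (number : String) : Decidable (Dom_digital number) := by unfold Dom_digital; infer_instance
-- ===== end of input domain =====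

-- B replaces A's runtime split+pad of art templates with a precomputed table of flat
-- 25-char strings per digit and builds rows by slicing; same output, same cost.

-- ===== PORT A =====
-- Module constant `digits`, as key -> value (Pre_ keeps lookups on real keys).
def digitsArt (c : Char) : List Char := match c with
  | '0' => "\n --\n|  |\n|  |\n --".toList
  | '1' => "\n\n\n|\n|".toList
  | '2' => "--\n  |\n--\n|\n --".toList
  | '3' => "--\n  |\n--\n  |\n--".toList
  | '4' => "\n\n|  |\n --\n   |".toList
  | '5' => " --\n|\n --\n   |\n --".toList
  | '6' => "\n\n|\n|__\n|__|".toList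
  | '7' => "\n\n--\n  |\n  |".toList
  | '8' => " --\n|  |\n --\n|  |\n --".toList
  | '9' => " --\n|  |\n --\n   |\n --".toList
  | _ => []   -- KeyError in Python; excluded by Pre_digital

-- `adder = digits[digit].split('\n')[count]; if len(adder) < 5: adder += ' '*(5-len(adder))`
-- count comes from range(5) and every art constant has exactly 5 lines, so [count] never fails.
def adderA (count : Int) (digit : Char) : List Char :=
  let adder := PySem.List.pyGetD (PySem.Chars.splitOn (digitsArt digit) ['\n']) count []
  if adder.length < 5 then adder ++ List.replicate (5 - adder.length) ' ' else adder

-- rows kept as List Char (Python str = List Char under the convention), String.ofList on return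
def digital (number : String) : List String :=
  let space : List (List Char) := (PySem.List.pyRange 0 5 1).map (fun _ => [])
  let space := (PySem.List.pyRange 0 5 1).foldl (fun space count =>
    number.toList.foldl (fun space digit =>
      -- space[count] += adder  (count ∈ [0,5), nonnegative, so .toNat is exact here)
      space.set count.toNat (space.getD count.toNat [] ++ adderA count digit)) space) space
  space.map String.ofList

-- ===== PORT B =====
-- B's module constant FLAT: one flat 25-char string per digit.
def flatArt (c : Char) : List Char := match c with
  | '0' => "      --  |  | |  |  --  ".toList
  | '1' => "               |    |    ".toList
  | '2' => "--     |  --   |     --  ".toList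
  | '3' => "--     |  --     |  --   ".toList
  | '4' => "          |  |  --     | ".toList
  | '5' => " --  |     --     |  --  ".toList
  | '6' => "          |    |__  |__| ".toList
  | '7' => "          --     |    |  ".toList
  | '8' => " --  |  |  --  |  |  --  ".toList
  | '9' => " --  |  |  --     |  --  ".toList
  | _ => []   -- KeyError in Python; excluded by Pre_digital

def digital_alt (number : String) : List String :=
  let flats := number.toList.map flatArt
  (PySem.List.pyRange 0 5 1).map (fun r =>
    String.ofList ((flats.map (fun f => PySem.List.slice f (some (5*r)) (some (5*r+5)))).flatten))

-- ===== PRECONDITION & SPEC =====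
-- A raises KeyError on any character outside the dict's keys '0'..'9'; exactly those inputs are excluded.
def Pre_digital (number : String) : Prop :=
  number.toList.all (fun c => c ∈ ['0','1','2','3','4','5','6','7','8','9']) = true
instance (number : String) : Decidable (Pre_digital number) := by unfold Pre_digital; infer_instance

def pvWitness_digital : String := "26"

def Spec_digital (number : String) (out : List String) : Prop := out = digital_alt number
instance (number : String) (out : List String) : Decidable (Spec_digital number out) := by unfold Spec_digital; infer_instance

-- ===== CLAIM (what is proved, stated in full; the proofs are below) =====
def Claim_equal_digital : Prop := ∀ (number : String), Dom_digital number → Pre_digital number → Spec_digital number (digital number)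

-- ===== LEMMAS AND PROOFS =====

-- B's per-row per-digit contribution
def sliceB (r : Int) (digit : Char) : List Char :=
  PySem.List.slice (flatArt digit) (some (5*r)) (some (5*r+5))

theorem adder_eq (count : Int) (hc : count = 0 ∨ count = 1 ∨ count = 2 ∨ count = 3 ∨ count = 4)
    (d : Char) (hd : d ∈ ['0','1','2','3','4','5','6','7','8','9']) :
    adderA count d = sliceB count d := by
  simp only [List.mem_cons, List.not_mem_nil, or_false] at hd
  rcases hc with rfl | rfl | rfl | rfl | rfl <;>
    rcases hd with rfl | rfl | rfl | rfl | rfl | rfl | rfl | rfl | rfl | rfl <;> decide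

-- A's inner loop: appending each digit's adder to slot c is one set of the concatenated row
theorem innerA_eq (c : Int) (f : Int → Char → List Char) :
    ∀ (ds : List Char) (sp : List (List Char)), c.toNat < sp.length →
    ds.foldl (fun sp d => sp.set c.toNat (sp.getD c.toNat [] ++ f c d)) sp
      = sp.set c.toNat (sp.getD c.toNat [] ++ (ds.map (f c)).flatten) := by
  intro ds
  induction ds with
  | nil => intro sp h
           simp [List.getD, List.getElem?_eq_getElem h, List.set_getElem_self]
  | cons d ds ih =>
      intro sp h
      rw [List.foldl_cons, ih _ (by simpa using h), List.set_set]
      simp [List.getD, h, List.append_assoc]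

-- the row produced by A's slot c equals the row B slices out for row c
theorem row_eq (number : String) (hpre : Pre_digital number) (c : Int)
    (hc : c = 0 ∨ c = 1 ∨ c = 2 ∨ c = 3 ∨ c = 4) :
    (number.toList.map (adderA c)).flatten
      = ((number.toList.map flatArt).map
          (fun f => PySem.List.slice f (some (5*c)) (some (5*c+5)))).flatten := by
  rw [List.map_map]
  congr 1
  unfold Pre_digital at hpre
  rw [List.all_eq_true] at hpre
  exact List.map_congr_left (fun d hd => adder_eq c hc d (by simpa using hpre d hd))

-- ===== VERDICT (by name: the statement is the Claim_ definition above) =====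
theorem digital_spec : Claim_equal_digital := by
  intro number _ hpre
  unfold Spec_digital digital digital_alt
  have h5 : PySem.List.pyRange 0 5 1 = [0, 1, 2, 3, 4] := by decide
  simp only [h5, List.map_cons, List.map_nil, List.foldl_cons, List.foldl_nil]
  rw [innerA_eq 0 adderA _ _ (by decide),
      innerA_eq 1 adderA _ _ (by simp),
      innerA_eq 2 adderA _ _ (by simp),
      innerA_eq 3 adderA _ _ (by simp),
      innerA_eq 4 adderA _ _ (by simp)]
  rw [← row_eq number hpre 0 (by norm_num), ← row_eq number hpre 1 (by norm_num),
      ← row_eq number hpre 2 (by norm_num), ← row_eq number hpre 3 (by norm_num),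
      ← row_eq number hpre 4 (by norm_num)]
  generalize (number.toList.map (adderA 0)).flatten = r0
  generalize (number.toList.map (adderA 1)).flatten = r1
  generalize (number.toList.map (adderA 2)).flatten = r2
  generalize (number.toList.map (adderA 3)).flatten = r3
  generalize (number.toList.map (adderA 4)).flatten = r4
  rfl
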